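-- pv_equiv track=rewrite | github.com/tal20100/DockerScope | dockerscope/attack/attack_graph.py | _is_sensitive_path
-- ===== SOURCE A (Python) =====
-- def _is_sensitive_path(path: str) -> bool:
--     """Check if a path is considered sensitive for security."""
--     sensitive_paths = {
--         "/", "/etc", "/root", "/boot", "/usr/bin", "/usr/sbin",
--         "/proc", "/sys", "/dev", "/var/log", "/var/lib/docker"
--     }
--     for sp in sensitive_paths:
--         if sp == "/":
--             if path == "/":
--                 return True
--         elif path == sp or path.startswith(sp + "/"):
--             return True
--     return False
-- ===== SOURCE B (Python) =====
-- def _is_sensitive_path(path: str) -> bool: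
--     """Ancestor-prefix membership: test the path and each of its '/'-cut
--     prefixes (except a bare '/') against the sensitive set."""
--     sensitive = {"/", "/etc", "/root", "/boot", "/usr/bin", "/usr/sbin",
--                  "/proc", "/sys", "/dev", "/var/log", "/var/lib/docker"}
--     candidates = [path]
--     for i, ch in enumerate(path):
--         if ch == '/' and path[:i] != '/':
--             candidates.append(path[:i])
--     return any(c in sensitive for c in candidates)
-- ===== Notes on version B (the rewrite author's own statement) =====
-- stated objective: alternative
-- what changed: B traverses the path's characters once, collecting the path plus every '/'-cut prefix (except a bare '/') as candidates, and tests set membership, instead of A's loop over the sensitive set with startswith checks.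
import Mathlib
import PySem

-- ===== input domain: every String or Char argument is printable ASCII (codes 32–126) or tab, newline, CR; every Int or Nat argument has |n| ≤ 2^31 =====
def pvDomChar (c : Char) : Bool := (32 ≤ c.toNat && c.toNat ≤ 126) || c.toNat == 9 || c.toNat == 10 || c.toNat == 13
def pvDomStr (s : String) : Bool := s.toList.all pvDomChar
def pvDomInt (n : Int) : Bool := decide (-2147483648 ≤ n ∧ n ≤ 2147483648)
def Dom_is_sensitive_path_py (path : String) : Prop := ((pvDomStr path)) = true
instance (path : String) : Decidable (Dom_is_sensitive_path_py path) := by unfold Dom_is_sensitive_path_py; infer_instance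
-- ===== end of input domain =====

-- B replaces A's loop over the sensitive set (with startswith tests) by a single pass over the
-- path collecting its '/'-cut ancestor prefixes and testing set membership ("alternative").

-- ===== PORT A =====
-- the literal set of sensitive paths, in source order (the loop's result is order-independent)
def sensA : List String :=
  ["/", "/etc", "/root", "/boot", "/usr/bin", "/usr/sbin",
   "/proc", "/sys", "/dev", "/var/log", "/var/lib/docker"]

def is_sensitive_path_py (path : String) : Bool :=
  sensA.any (fun sp =>
    if sp = "/" then decide (path = "/")
    else decide (path = sp) || PySem.Str.startswith path (sp ++ "/"))

-- ===== PORT B =====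
def sensB : PySem.Set String :=
  PySem.Set.ofList
    ["/", "/etc", "/root", "/boot", "/usr/bin", "/usr/sbin",
     "/proc", "/sys", "/dev", "/var/log", "/var/lib/docker"]

def is_sensitive_path_py_alt (path : String) : Bool :=
  let cs := path.toList
  -- 'for i, ch in enumerate(path): if ch == '/' and path[:i] != '/': candidates.append(path[:i])'
  -- (index i from enumerate is ≥ 0, so path[:i] is exactly 'take i')
  let candidates :=
    (PySem.List.enumerate cs).foldl
      (fun acc p =>
        if p.2 == '/' && String.mk (cs.take p.1.toNat) != "/"
        then acc ++ [String.mk (cs.take p.1.toNat)] else acc)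
      [path]
  candidates.any (fun c => sensB.contains c)

-- ===== PRECONDITION & SPEC =====
def Spec_is_sensitive_path_py (path : String) (out : Bool) : Prop := out = is_sensitive_path_py_alt path
instance (path : String) (out : Bool) : Decidable (Spec_is_sensitive_path_py path out) := by unfold Spec_is_sensitive_path_py; infer_instance

-- ===== CLAIM (what is proved, stated in full; the proofs are below) =====
def Claim_equal_is_sensitive_path_py : Prop := ∀ (path : String), Dom_is_sensitive_path_py path → Spec_is_sensitive_path_py path (is_sensitive_path_py path)

-- ===== LEMMAS AND PROOFS =====

-- '(ps ++ ['/']) is a prefix of cs' iff some index i holds '/' with 'take i cs = ps'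
theorem prefix_slash_iff (cs ps : List Char) :
    (ps ++ ['/']) <+: cs ↔ ∃ i : Nat, cs[i]? = some '/' ∧ cs.take i = ps := by
  constructor
  · intro h
    have hlen : ps.length + 1 ≤ cs.length := by
      have := h.length_le; simpa using this
    have htake := List.prefix_iff_eq_take.mp h
    refine ⟨ps.length, ?_, ?_⟩
    · have h' : cs[ps.length]? = (ps ++ ['/'])[ps.length]? := by
        rw [htake]
        rw [List.getElem?_take_of_lt (by simp)]
      simp at h' ⊢
      exact h'
    · have h2 := congrArg (List.take ps.length) htake
      simpa [List.take_take] using h2.symm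
  · rintro ⟨i, hi, ht⟩
    obtain ⟨hilt, hgi⟩ := List.getElem?_eq_some_iff.mp hi
    have h1 : cs.take (i + 1) = ps ++ ['/'] := by
      rw [List.take_succ, ht, hi]; rfl
    exact h1 ▸ List.take_prefix (i + 1) cs

-- the B-side fold collects exactly the filtered prefixes
theorem candidates_eq (cs : List Char) (acc : List String) :
    (PySem.List.enumerate cs).foldl
      (fun acc p =>
        if p.2 == '/' && String.mk (cs.take p.1.toNat) != "/"
        then acc ++ [String.mk (cs.take p.1.toNat)] else acc)
      acc
    = acc ++ (((PySem.List.enumerate cs).filter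
        (fun p => p.2 == '/' && String.mk (cs.take p.1.toNat) != "/")).map
        (fun p => String.mk (cs.take p.1.toNat))) := by
  exact PySem.List.foldl_append_if _ _ _ _

theorem toList_mk (l : List Char) : (String.mk l).toList = l := ((String.ofList_eq).mp rfl).symm

theorem mk_toList (s : String) : String.mk s.toList = s := (String.ofList_eq).mpr rfl

theorem contains_sensB (x : String) : sensB.contains x = true ↔ x ∈ sensA := by
  rw [PySem.Set.contains_iff]
  simp [sensB, sensA, PySem.Set.mem_ofList]

-- A's loop as an existential over the sensitive list
theorem a_iff (path : String) : is_sensitive_path_py path = true ↔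
    ∃ sp ∈ sensA, if sp = "/" then path = "/"
      else (path = sp ∨ (sp.toList ++ ['/']) <+: path.toList) := by
  have hslash : ("/" : String).toList = ['/'] := rfl
  simp only [is_sensitive_path_py, List.any_eq_true, PySem.Str.startswith_eq,
    String.toList_append, hslash]
  constructor <;> rintro ⟨sp, hsp, h⟩ <;> refine ⟨sp, hsp, ?_⟩ <;>
    by_cases hr : sp = "/" <;> simp_all [PySem.Chars.startswith_iff]

-- B's candidate scan as an existential over the path's indices
theorem alt_iff (path : String) : is_sensitive_path_py_alt path = true ↔
    path ∈ sensA ∨ ∃ k : Nat, path.toList[k]? = some '/' ∧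
      String.mk (path.toList.take k) ≠ "/" ∧ String.mk (path.toList.take k) ∈ sensA := by
  simp only [is_sensitive_path_py_alt]
  rw [candidates_eq]
  simp only [List.any_append, List.any_map, List.any_filter, List.any_eq_true,
    PySem.List.mem_enumerate_iff, Bool.or_eq_true, Bool.and_eq_true, beq_iff_eq, bne_iff_ne,
    List.mem_singleton, Function.comp, contains_sensB, exists_eq_left]
  constructor
  · rintro (h | ⟨x, ⟨k, hk, rfl⟩, ⟨hch, hne⟩, hc⟩)
    · exact Or.inl h
    · simp only [Int.toNat_natCast, zero_add] at hch hne hc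
      exact Or.inr ⟨k, List.getElem?_eq_some_iff.mpr ⟨hk, hch⟩, hne, hc⟩
  · rintro (h | ⟨k, hk, hne, hc⟩)
    · exact Or.inl h
    · obtain ⟨hlt, hch⟩ := List.getElem?_eq_some_iff.mp hk
      exact Or.inr ⟨(0 + (k : Int), path.toList[k]), ⟨k, hlt, rfl⟩,
        ⟨hch, by simpa using hne⟩, by simpa using hc⟩

-- ===== VERDICT (by name: the statement is the Claim_ definition above) =====
theorem is_sensitive_path_py_spec : Claim_equal_is_sensitive_path_py := by
  intro path _
  unfold Spec_is_sensitive_path_py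
  rw [Bool.eq_iff_iff, a_iff, alt_iff]
  constructor
  · rintro ⟨sp, hsp, h⟩
    by_cases hr : sp = "/"
    · subst hr
      rw [if_pos rfl] at h
      exact Or.inl (h ▸ hsp)
    · rw [if_neg hr] at h
      rcases h with rfl | hpre
      · exact Or.inl hsp
      · obtain ⟨i, hi, ht⟩ := (prefix_slash_iff _ _).mp hpre
        refine Or.inr ⟨i, hi, ?_, ?_⟩
        · rw [ht, mk_toList]; exact hr
        · rw [ht, mk_toList]; exact hsp
  · rintro (hm | ⟨k, hk, hne, hc⟩)
    · refine ⟨path, hm, ?_⟩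
      by_cases hr : path = "/" <;> simp [hr]
    · refine ⟨String.mk (path.toList.take k), hc, ?_⟩
      rw [if_neg hne]
      exact Or.inr ((prefix_slash_iff _ _).mpr ⟨k, hk, (toList_mk _).symm⟩)
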